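-- pv_equiv track=rewrite | github.com/aorursy/new-nb-7 | sibmike_m5-out-of-stock-feature-640x-faster.py | gap_finder
-- ===== SOURCE A (Python) =====
-- def gap_finder(ts):
--
--
--
--     # this function finds gaps and calculates their length:
--
--     # note ts: 0 = day with sales, 1 = days with 0 sales
--
--
--
--     for i, gap in enumerate(ts):
--
--         if gap == 0:
--
--             continue
--
--         elif i!=0:
--
--             ts[i] += ts[i-1]
--
--             if ts[i-1]!=0: ts[i-1] = -1
--
--     return ts
-- ===== SOURCE B (Python) =====
-- def gap_finder(ts):
--     # Two-pass rewrite: build cumulative run sums c (reset at zeros), then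
--     # rewrite ts in place: -1 for marked run interiors, c[i] otherwise.
--     n = len(ts)
--     orig = list(ts)
--     c = []
--     acc = 0
--     for v in orig:
--         acc = 0 if v == 0 else acc + v
--         c.append(acc)
--     for i in range(n):
--         if c[i] != 0 and i + 1 < n and orig[i + 1] != 0:
--             ts[i] = -1
--         else:
--             ts[i] = c[i]
--     return ts
-- ===== Notes on version B (the rewrite author's own statement) =====
-- stated objective: alternative
-- what changed: Replaced A's single in-place look-back pass with retroactive -1 marking by a table build (cumulative run sums resetting at zeros) followed by a lookahead pass that writes each final value once.
import Mathlib
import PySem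

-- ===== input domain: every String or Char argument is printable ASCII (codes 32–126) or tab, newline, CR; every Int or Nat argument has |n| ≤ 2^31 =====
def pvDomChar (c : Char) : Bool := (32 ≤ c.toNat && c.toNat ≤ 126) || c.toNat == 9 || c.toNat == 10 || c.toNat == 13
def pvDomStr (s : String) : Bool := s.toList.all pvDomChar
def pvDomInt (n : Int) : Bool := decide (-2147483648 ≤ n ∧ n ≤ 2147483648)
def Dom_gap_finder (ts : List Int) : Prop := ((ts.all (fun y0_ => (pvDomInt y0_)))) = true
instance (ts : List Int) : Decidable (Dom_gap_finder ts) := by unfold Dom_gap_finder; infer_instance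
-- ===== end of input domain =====

-- B replaces A's look-back retroactive -1 marking by a cumulative-sum table plus a lookahead
-- pass; both Pythons mutate ts in place and return it — the equivalence here is about the
-- returned value (B performs the same mutation).

-- ===== PORT A =====
-- for i, gap in enumerate(ts): enumerate reads the live list, so gap := acc.getD i 0;
-- every index used is in range (i < n, and i-1 ≥ 0 since i ≠ 0), so getD is exact.
def gap_finder (ts : List Int) : List Int :=
  (List.range ts.length).foldl
    (fun acc i =>
      let gap := acc.getD i 0
      if gap = 0 then acc
      else if i ≠ 0 then
        let acc1 := acc.set i (acc.getD i 0 + acc.getD (i - 1) 0)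
        if acc1.getD (i - 1) 0 ≠ 0 then acc1.set (i - 1) (-1) else acc1
      else acc)
    ts

-- ===== PORT B =====
-- first pass: c = cumulative run sums, acc resets to 0 on zero elements (list append fold);
-- second pass: for i in range(n), write -1 or c[i] (in-place writes ported as map over range);
-- indices i and i+1 are in range whenever read, so getD is exact.
def gap_finder_alt (ts : List Int) : List Int :=
  let orig := ts
  let n := ts.length
  let c := (orig.foldl
    (fun (p : List Int × Int) v =>
      let a := if v = 0 then 0 else p.2 + v
      (p.1 ++ [a], a)) (([] : List Int), (0 : Int))).1
  (List.range n).map (fun i =>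
    if c.getD i 0 ≠ 0 ∧ i + 1 < n ∧ orig.getD (i + 1) 0 ≠ 0 then -1 else c.getD i 0)

-- ===== PRECONDITION & SPEC =====
def Spec_gap_finder (ts : List Int) (out : List Int) : Prop := out = gap_finder_alt ts
instance (ts : List Int) (out : List Int) : Decidable (Spec_gap_finder ts out) := by unfold Spec_gap_finder; infer_instance

-- ===== CLAIM (what is proved, stated in full; the proofs are below) =====
def Claim_equal_gap_finder : Prop := ∀ (ts : List Int), Dom_gap_finder ts → Spec_gap_finder ts (gap_finder ts)

-- ===== LEMMAS AND PROOFS =====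

-- A's loop step, named for the lemmas
def stepA (acc : List Int) (i : Nat) : List Int :=
  let gap := acc.getD i 0
  if gap = 0 then acc
  else if i ≠ 0 then
    let acc1 := acc.set i (acc.getD i 0 + acc.getD (i - 1) 0)
    if acc1.getD (i - 1) 0 ≠ 0 then acc1.set (i - 1) (-1) else acc1
  else acc

-- zipper form of A's loop: rd = reversed processed prefix, rest = untouched suffix
def fA : List Int → List Int → List Int
  | rd, [] => rd.reverse
  | rd, v :: vs =>
    if v = 0 then fA (0 :: rd) vs
    else
      match rd with
      | [] => fA [v] vs
      | p :: rd' =>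
        if p ≠ 0 then fA ((v + p) :: -1 :: rd') vs
        else fA ((v + p) :: p :: rd') vs

-- common reference function: cumulative sum with lookahead marking
def gmark : Int → List Int → List Int
  | _, [] => []
  | a, v :: vs =>
    let a' := if v = 0 then 0 else a + v
    (if a' ≠ 0 ∧ vs.headD 0 ≠ 0 ∧ vs ≠ [] then -1 else a') :: gmark a' vs

-- top-of-prefix correction: A marks rd's head -1 retroactively when the next element fires
def markTop (rd rest : List Int) : List Int :=
  match rd, rest with
  | p :: rd', w :: _ => if w ≠ 0 ∧ p ≠ 0 then -1 :: rd' else p :: rd'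
  | _, _ => rd

-- cumulative run sums (first pass of B)
def cacc : Int → List Int → List Int
  | _, [] => []
  | a, v :: vs =>
    let a' := if v = 0 then 0 else a + v
    a' :: cacc a' vs

theorem getD_append_len (l1 l2 : List Int) (v : Int) :
    (l1 ++ v :: l2).getD l1.length 0 = v := by
  induction l1 with
  | nil => rfl
  | cons x xs ih => simpa using ih

theorem set_append_len (l1 l2 : List Int) (v x : Int) :
    (l1 ++ v :: l2).set l1.length x = l1 ++ x :: l2 := by
  induction l1 with
  | nil => rfl
  | cons y ys ih => simpa using ih

theorem foldA_inv : ∀ (rest rd : List Int),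
    (List.range' rd.length rest.length 1).foldl stepA (rd.reverse ++ rest) = fA rd rest := by
  intro rest
  induction rest with
  | nil => intro rd; simp [fA]
  | cons v vs ih =>
    intro rd
    rw [List.length_cons, List.range'_succ, List.foldl_cons]
    have hgap : (rd.reverse ++ v :: vs).getD rd.length 0 = v := by
      have := getD_append_len rd.reverse (v :: vs).tail v
      simpa using getD_append_len rd.reverse vs v
    by_cases hv : v = 0
    · subst hv
      have hs : stepA (rd.reverse ++ 0 :: vs) rd.length = rd.reverse ++ 0 :: vs := by
        simp [stepA]
      rw [hs]
      have := ih (0 :: rd)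
      simpa [fA, List.append_assoc] using this
    · cases rd with
      | nil =>
        have hs : stepA ([] ++ v :: vs) 0 = v :: vs := by
          simp [stepA, hv]
        simp only [List.reverse_nil, List.nil_append, List.length_nil] at *
        rw [hs]
        have := ih [v]
        simpa [fA, hv] using this
      | cons p rd' =>
        have hL : (p :: rd').reverse ++ v :: vs = rd'.reverse ++ p :: v :: vs := by
          simp [List.append_assoc]
        have hlen : (p :: rd').length = rd'.length + 1 := rfl
        have hgap' : ((p :: rd').reverse ++ v :: vs).getD (p :: rd').length 0 = v := by
          simpa using getD_append_len (p :: rd').reverse vs v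
        have hprev : ((p :: rd').reverse ++ v :: vs).getD ((p :: rd').length - 1) 0 = p := by
          rw [hL, hlen]
          simpa using getD_append_len rd'.reverse (v :: vs) p
        have hset1 : ((p :: rd').reverse ++ v :: vs).set (p :: rd').length (v + p) =
            (p :: rd').reverse ++ (v + p) :: vs := by
          simpa using set_append_len (p :: rd').reverse vs v (v + p)
        have hprev1 : ((p :: rd').reverse ++ (v + p) :: vs).getD ((p :: rd').length - 1) 0 = p := by
          have : (p :: rd').reverse ++ (v + p) :: vs = rd'.reverse ++ p :: (v + p) :: vs := by
            simp [List.append_assoc]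
          rw [this, hlen]
          simpa using getD_append_len rd'.reverse ((v + p) :: vs) p
        have hset2 : ((p :: rd').reverse ++ (v + p) :: vs).set ((p :: rd').length - 1) (-1) =
            ((-1) :: rd').reverse ++ (v + p) :: vs := by
          have h1 : (p :: rd').reverse ++ (v + p) :: vs = rd'.reverse ++ p :: (v + p) :: vs := by
            simp [List.append_assoc]
          have h2 : ((-1 : Int) :: rd').reverse ++ (v + p) :: vs =
              rd'.reverse ++ (-1) :: (v + p) :: vs := by
            simp [List.append_assoc]
          rw [h1, hlen, h2]
          simpa using set_append_len rd'.reverse ((v + p) :: vs) p (-1)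
        by_cases hp : p = 0
        · subst hp
          have hs : stepA ((0 :: rd').reverse ++ v :: vs) (0 :: rd').length =
              (0 :: rd').reverse ++ (v + 0) :: vs := by
            simp only [stepA, hgap', hprev, hprev1, hset1]
            simp [hv]
          rw [hs]
          have := ih ((v + 0) :: 0 :: rd')
          simpa [fA, hv, List.append_assoc] using this
        · have hs : stepA ((p :: rd').reverse ++ v :: vs) (p :: rd').length =
              ((-1) :: rd').reverse ++ (v + p) :: vs := by
            simp only [stepA, hgap', hprev, hprev1, hset1, hset2]
            simp [hv, hp]
          rw [hs]
          have := ih ((v + p) :: (-1) :: rd')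
          simpa [fA, hv, hp, List.append_assoc] using this

theorem fA_gmark : ∀ (rest rd : List Int),
    fA rd rest = (markTop rd rest).reverse ++ gmark (rd.headD 0) rest := by
  intro rest
  induction rest with
  | nil => intro rd; simp [fA, markTop, gmark]
  | cons v vs ih =>
    intro rd
    by_cases hv : v = 0
    · subst hv
      rw [show fA rd (0 :: vs) = fA (0 :: rd) vs from by simp [fA]]
      rw [ih (0 :: rd)]
      cases rd with
      | nil => cases vs <;> simp [markTop, gmark]
      | cons p rd' =>
        cases vs with
        | nil => simp [markTop, gmark]
        | cons w ws => simp [markTop, gmark, List.append_assoc]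
    · cases rd with
      | nil =>
        rw [show fA [] (v :: vs) = fA [v] vs from by simp [fA, hv]]
        rw [ih [v]]
        cases vs with
        | nil => simp [markTop, gmark, hv]
        | cons w ws =>
          by_cases hw : w = 0 <;> simp [markTop, gmark, hv, hw]
      | cons p rd' =>
        by_cases hp : p = 0
        · subst hp
          rw [show fA (0 :: rd') (v :: vs) = fA ((v + 0) :: 0 :: rd') vs from by
            simp [fA, hv]]
          rw [ih ((v + 0) :: 0 :: rd')]
          cases vs with
          | nil => simp [markTop, gmark, hv, List.append_assoc]
          | cons w ws =>
            by_cases hw : w = 0 <;>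
              simp [markTop, gmark, hv, hw, List.append_assoc]
        · rw [show fA (p :: rd') (v :: vs) = fA ((v + p) :: -1 :: rd') vs from by
            simp [fA, hv, hp]]
          rw [ih ((v + p) :: -1 :: rd')]
          have hc : v + p = p + v := by ring
          cases vs with
          | nil => simp [markTop, gmark, hv, hp, hc, List.append_assoc]
          | cons w ws =>
            by_cases hw : w = 0 <;> by_cases hpv : p + v = 0 <;>
              simp [markTop, gmark, hv, hp, hw, hc, hpv, List.append_assoc]

theorem gap_finder_eq_gmark (ts : List Int) : gap_finder ts = gmark 0 ts := by
  have h0 : gap_finder ts = (List.range ts.length).foldl stepA ts := rfl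
  rw [h0, List.range_eq_range']
  have h1 := foldA_inv ts []
  simp only [List.length_nil, List.reverse_nil, List.nil_append] at h1
  rw [h1, fA_gmark ts []]
  cases ts <;> simp [markTop]

-- first pass of B computes cacc
theorem foldl_cacc : ∀ (ts : List Int) (cs : List Int) (a : Int),
    ts.foldl (fun (p : List Int × Int) v =>
      let x := if v = 0 then 0 else p.2 + v
      (p.1 ++ [x], x)) (cs, a) = (cs ++ cacc a ts, (cacc a ts).getLastD a) := by
  intro ts
  induction ts with
  | nil => intro cs a; simp [cacc]
  | cons v vs ih =>
    intro cs a
    simp only [List.foldl_cons]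
    rw [ih]
    refine Prod.ext ?_ ?_
    · simp [cacc, List.append_assoc]
    · show (cacc (if v = 0 then 0 else a + v) vs).getLastD (if v = 0 then 0 else a + v) =
        (cacc a (v :: vs)).getLastD a
      simp only [cacc]
      exact (List.getLastD_cons ..).symm

theorem getD_cacc_map (ts : List Int) : ∀ (a : Int),
    (List.range ts.length).map (fun i =>
      if (cacc a ts).getD i 0 ≠ 0 ∧ i + 1 < ts.length ∧ ts.getD (i + 1) 0 ≠ 0 then -1
      else (cacc a ts).getD i 0) = gmark a ts := by
  induction ts with
  | nil => intro a; simp [gmark]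
  | cons v vs ih =>
    intro a
    rw [List.length_cons, List.range_succ_eq_map, List.map_cons, List.map_map]
    show _ :: _ = gmark a (v :: vs)
    simp only [gmark]
    congr 1
    · cases vs <;> simp [cacc]
    · rw [← ih (if v = 0 then 0 else a + v)]
      refine List.map_congr_left ?_
      intro i _
      simp only [Function.comp_apply, cacc, Nat.succ_eq_add_one, List.getD_cons_succ,
        Nat.add_lt_add_iff_right]

theorem gap_finder_alt_eq_gmark (ts : List Int) : gap_finder_alt ts = gmark 0 ts := by
  unfold gap_finder_alt
  have hc := foldl_cacc ts [] 0
  simp only [List.nil_append] at hc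
  simp only [hc]
  exact getD_cacc_map ts 0

-- ===== VERDICT (by name: the statement is the Claim_ definition above) =====
theorem gap_finder_spec : Claim_equal_gap_finder := by
  intro ts _
  unfold Spec_gap_finder
  rw [gap_finder_eq_gmark, gap_finder_alt_eq_gmark]
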